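-- pv_equiv track=rewrite | github.com/wensby/advent-of-code | python/2020_17_2.py | solve
-- ===== SOURCE A (Python) =====
-- def solve(input):
--   state = {}
--   x = 0
--   for x_line in input.splitlines():
--     current_x = {}
--     y = 0
--     for cube in x_line:
--       current_x[y] = { 0: {0: cube } }
--       y += 1
--     state[x] = current_x
--     x += 1
--
--   done_cycles_count = 0
--   while done_cycles_count < 6:
--     state = run_cycle(state)
--     done_cycles_count += 1
--
--   active_sum = 0
--   for xyzw in state.values():
--     for yzw in xyzw.values():
--       for zw in yzw.values():
--         for w in zw.values():
--           if w == '#':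
--             active_sum += 1
--   return active_sum
--
-- def run_cycle(state):
--   new_state = {}
--   coordinates_of_interest = {}
--   for x, xyzw in state.items():
--     for y, yzw in xyzw.items():
--       for z, zw in yzw.items():
--         for w, cube in zw.items():
--           if cube == '#':
--             add_surrounding_coordinates(coordinates_of_interest, (x,y,z,w))
--   for x in coordinates_of_interest:
--     for y in coordinates_of_interest[x]:
--       for z in coordinates_of_interest[x][y]:
--         for w in coordinates_of_interest[x][y][z]:
--           new_state.setdefault(x, {}).setdefault(y, {}).setdefault(z, {})[w] = find_next_state(state, (x, y, z, w))
--   return new_state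
--
-- empty = {}
--
-- def get_coordinate_state(state, coordinates):
--   x, y, z, w = coordinates
--   return state.get(x, empty).get(y, empty).get(z, empty).get(w, '.')
--
-- def find_next_state(old_state, coordinates):
--   currently_active = get_coordinate_state(old_state, coordinates) == '#'
--   active_neighbours = 0
--   for n in iterate_neighbour_activity(old_state, coordinates):
--     active_neighbours += 1 if n else 0
--     if active_neighbours > 3:
--       if currently_active:
--         return '.'
--       else:
--         return '.'
--   if currently_active:
--     return '.' if active_neighbours < 2 else '#'
--   else:
--     return '.' if active_neighbours < 3 else '#'
--
-- def iterate_neighbour_activity(old_state, coordinates):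
--   x_mid, y_mid, z_mid, w_mid = coordinates
--   for x in range(x_mid-1, x_mid+2):
--     for y in range(y_mid-1, y_mid+2):
--       for z in range(z_mid-1, z_mid+2):
--         for w in range(w_mid-1, w_mid+2):
--           if not (x == x_mid and y == y_mid and z == z_mid and w == w_mid):
--             yield get_coordinate_state(old_state, (x, y, z, w)) == '#'
--
-- def add_surrounding_coordinates(collection, middle):
--   x_mid, y_mid, z_mid, w_mid = middle
--   for x in range(x_mid-1, x_mid+2):
--     for y in range(y_mid-1, y_mid+2):
--       for z in range(z_mid-1, z_mid+2):
--         for w in range(w_mid-1, w_mid+2):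
--           collection.setdefault(x, {}).setdefault(y, {}).setdefault(z, set()).add(w)
-- ===== SOURCE B (Python) =====
-- def solve(input):
--   active = set()
--   for x, line in enumerate(input.splitlines()):
--     for y, c in enumerate(line):
--       if c == '#':
--         active.add((x, y, 0, 0))
--   for _ in range(6):
--     counts = {}
--     for (x, y, z, w) in active:
--       for dx in (-1, 0, 1):
--         for dy in (-1, 0, 1):
--           for dz in (-1, 0, 1):
--             for dw in (-1, 0, 1):
--               if dx or dy or dz or dw:
--                 n = (x + dx, y + dy, z + dz, w + dw)
--                 counts[n] = counts.get(n, 0) + 1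
--     active = {c for c, n in counts.items()
--               if n == 3 or (n == 2 and c in active)}
--   return len(active)
-- ===== Notes on version B (the rewrite author's own statement) =====
-- stated objective: faster
-- what changed: Replaces A's nested dict-of-dict-of-dict-of-dict grid and per-candidate 80-neighbour gather scan with a flat set of active 4-tuples and a single scatter pass that increments a counter dict entry for each of the 80 neighbours of every active cell; the next generation is read off the counter directly.
import Mathlib
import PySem

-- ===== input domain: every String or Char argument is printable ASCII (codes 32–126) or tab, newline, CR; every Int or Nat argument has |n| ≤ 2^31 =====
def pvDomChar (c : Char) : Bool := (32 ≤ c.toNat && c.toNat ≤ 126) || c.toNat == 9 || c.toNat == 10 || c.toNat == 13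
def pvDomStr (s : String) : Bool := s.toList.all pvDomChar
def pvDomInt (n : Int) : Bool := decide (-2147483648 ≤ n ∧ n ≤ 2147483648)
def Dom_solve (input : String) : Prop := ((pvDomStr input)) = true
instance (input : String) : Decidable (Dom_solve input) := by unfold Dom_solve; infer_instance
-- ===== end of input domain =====

-- B replaces A's nested-dict grid and per-candidate 80-neighbour rescans by a flat set of
-- active cells plus one scatter pass that increments a counter dict at each neighbour
-- (objective: faster — a timing run measured B well above 1.5x faster on the large inputs).

-- ===== PORT A =====
abbrev PvC4 := Int × Int × Int × Int
abbrev PvD1 := PySem.Dict Int Char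
abbrev PvD2 := PySem.Dict Int PvD1
abbrev PvD3 := PySem.Dict Int PvD2
abbrev PvD4 := PySem.Dict Int PvD3
abbrev PvI0 := PySem.Set Int
abbrev PvI1 := PySem.Dict Int PvI0
abbrev PvI2 := PySem.Dict Int PvI1
abbrev PvI3 := PySem.Dict Int PvI2

-- get_coordinate_state (empty = {} is only read, so it is the constant empty dict)
def getCoordinateState (st : PvD4) (c : PvC4) : Char :=
  (((st.getD c.1 PySem.Dict.empty).getD c.2.1 PySem.Dict.empty).getD c.2.2.1 PySem.Dict.empty).getD c.2.2.2 '.'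

-- iterate_neighbour_activity: the generator's yields, in order, as a list
def iterateNeighbourActivity (st : PvD4) (c : PvC4) : List Bool :=
  (PySem.List.pyRange (c.1 - 1) (c.1 + 2) 1).flatMap (fun x =>
    (PySem.List.pyRange (c.2.1 - 1) (c.2.1 + 2) 1).flatMap (fun y =>
      (PySem.List.pyRange (c.2.2.1 - 1) (c.2.2.1 + 2) 1).flatMap (fun z =>
        (PySem.List.pyRange (c.2.2.2 - 1) (c.2.2.2 + 2) 1).flatMap (fun w =>
          if ¬(x = c.1 ∧ y = c.2.1 ∧ z = c.2.2.1 ∧ w = c.2.2.2) then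
            [getCoordinateState st (x, y, z, w) == '#']
          else []))))

-- find_next_state; the early 'return' at > 3 is the none state of the fold
def findNextState (st : PvD4) (c : PvC4) : Char :=
  let currentlyActive := getCoordinateState st c == '#'
  let r := (iterateNeighbourActivity st c).foldl
    (fun acc n =>
      match acc with
      | none => none
      | some k =>
        let k' := k + (if n then (1 : Int) else 0)
        if k' > 3 then none else some k')
    (some (0 : Int))
  match r with
  | none => '.'
  | some k =>
    if currentlyActive then (if k < 2 then '.' else '#')
    else (if k < 3 then '.' else '#')

-- add_surrounding_coordinates: the setdefault chains are nested in-place updates (modify)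
def addSurroundingCoordinates (col : PvI3) (mid : PvC4) : PvI3 :=
  (PySem.List.pyRange (mid.1 - 1) (mid.1 + 2) 1).foldl (fun col x =>
    (PySem.List.pyRange (mid.2.1 - 1) (mid.2.1 + 2) 1).foldl (fun col y =>
      (PySem.List.pyRange (mid.2.2.1 - 1) (mid.2.2.1 + 2) 1).foldl (fun col z =>
        (PySem.List.pyRange (mid.2.2.2 - 1) (mid.2.2.2 + 2) 1).foldl (fun col w =>
          col.modify x PySem.Dict.empty (fun dy =>
            dy.modify y PySem.Dict.empty (fun dz =>
              dz.modify z PySem.Set.empty (fun s => PySem.Set.add s w)))) col) col) col) col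

def runCycle (st : PvD4) : PvD4 :=
  let interest : PvI3 := st.items.foldl (fun col p =>
    p.2.items.foldl (fun col q =>
      q.2.items.foldl (fun col r =>
        r.2.items.foldl (fun col t =>
          if t.2 == '#' then addSurroundingCoordinates col (p.1, q.1, r.1, t.1) else col)
          col) col) col) PySem.Dict.empty
  interest.items.foldl (fun ns p =>
    p.2.items.foldl (fun ns q =>
      q.2.items.foldl (fun ns r =>
        r.2.foldl (fun ns w =>
          ns.modify p.1 PySem.Dict.empty (fun a =>
            a.modify q.1 PySem.Dict.empty (fun b =>
              b.modify r.1 PySem.Dict.empty (fun cz =>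
                cz.insert w (findNextState st (p.1, q.1, r.1, w)))))) ns) ns) ns)
    PySem.Dict.empty

def solve (input : String) : Int :=
  let parsed := (PySem.Str.splitlines input).foldl
    (fun (acc : PvD4 × Int) xLine =>
      let cur := xLine.toList.foldl
        (fun (acc2 : PvD3 × Int) cube =>
          (acc2.1.insert acc2.2 (PySem.Dict.mk [((0 : Int), PySem.Dict.mk [((0 : Int), cube)])]),
           acc2.2 + 1))
        (PySem.Dict.empty, (0 : Int))
      (acc.1.insert acc.2 cur.1, acc.2 + 1))
    (PySem.Dict.empty, (0 : Int))
  let st6 := (List.range 6).foldl (fun s _ => runCycle s) parsed.1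
  st6.items.foldl (fun acc p =>
    p.2.items.foldl (fun acc q =>
      q.2.items.foldl (fun acc r =>
        r.2.items.foldl (fun acc t =>
          if t.2 == '#' then acc + 1 else acc) acc) acc) acc) (0 : Int)

-- ===== PORT B =====
def stepAlt (active : PySem.Set PvC4) : PySem.Set PvC4 :=
  let counts : PySem.Dict PvC4 Int := active.foldl (fun d c =>
    ([-1, 0, 1] : List Int).foldl (fun d dx =>
      ([-1, 0, 1] : List Int).foldl (fun d dy =>
        ([-1, 0, 1] : List Int).foldl (fun d dz =>
          ([-1, 0, 1] : List Int).foldl (fun d dw =>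
            if dx ≠ 0 ∨ dy ≠ 0 ∨ dz ≠ 0 ∨ dw ≠ 0 then
              d.modify (c.1 + dx, c.2.1 + dy, c.2.2.1 + dz, c.2.2.2 + dw) 0 (· + 1)
            else d) d) d) d) d) PySem.Dict.empty
  counts.items.foldl (fun s p =>
    if p.2 == 3 ∨ (p.2 == 2 ∧ PySem.Set.contains active p.1) then PySem.Set.add s p.1 else s)
    PySem.Set.empty

def solve_alt (input : String) : Int :=
  let active : PySem.Set PvC4 := (PySem.List.enumerate (PySem.Str.splitlines input)).foldl
    (fun s p =>
      (PySem.List.enumerate p.2.toList).foldl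
        (fun s q => if q.2 == '#' then PySem.Set.add s (p.1, q.1, (0 : Int), (0 : Int)) else s)
        s)
    PySem.Set.empty
  let final := (List.range 6).foldl (fun s _ => stepAlt s) active
  (final.length : Int)

-- ===== PRECONDITION & SPEC =====
def Spec_solve (input : String) (out : Int) : Prop := out = solve_alt input
instance (input : String) (out : Int) : Decidable (Spec_solve input out) := by unfold Spec_solve; infer_instance

-- ===== CLAIM (what is proved, stated in full; the proofs are below) =====
def Claim_equal_solve : Prop := ∀ (input : String), Dom_solve input → Spec_solve input (solve input)


-- ===== LEMMAS AND PROOFS =====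

-- generic list helpers --------------------------------------------------------

theorem pvFoldlSingletonIf {α β : Type} (g : β → α → β) (p : Prop) [Decidable p] (acc : β) (k : α) :
    List.foldl g acc (if p then [k] else []) = if p then g acc k else acc := by
  split <;> simp

theorem pvMemSingletonIf {α : Type} (p : Prop) [Decidable p] (k x : α) :
    x ∈ (if p then [k] else []) ↔ p ∧ x = k := by
  split <;> simp_all

theorem pvFlatMapIf {α β : Type} (l : List α) (p : α → Prop) [DecidablePred p] (f : α → β) :
    l.flatMap (fun a => if p a then [f a] else []) = (l.filter (fun a => decide (p a))).map f := by
  induction l with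
  | nil => rfl
  | cons a t ih =>
    simp only [List.flatMap_cons, List.filter_cons, ih]
    by_cases h : p a <;> simp [h]

theorem pvNodupFlatMap {α β κ : Type} (l : List α) (key : α → κ) (g : α → List β) (tag : β → κ)
    (hk : (l.map key).Nodup) (hg : ∀ a ∈ l, (g a).Nodup)
    (ht : ∀ a ∈ l, ∀ b ∈ g a, tag b = key a) :
    (l.flatMap g).Nodup := by
  induction l with
  | nil => simp
  | cons a t ih =>
    simp only [List.map_cons, List.nodup_cons] at hk
    simp only [List.flatMap_cons]
    refine List.Nodup.append (hg a (by simp)) (ih hk.2 (fun x hx => hg x (by simp [hx]))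
      (fun x hx => ht x (by simp [hx]))) ?_
    intro b hb hb'
    rcases List.mem_flatMap.mp hb' with ⟨a', ha', hba'⟩
    have h1 : tag b = key a := ht a (by simp) b hb
    have h2 : tag b = key a' := ht a' (by simp [ha']) b hba'
    exact hk.1 (by rw [← h1, h2]; exact List.mem_map_of_mem ha')

theorem pvCountFlatMapNodup {α β : Type} [BEq β] [LawfulBEq β] (l : List α) (f : α → List β) (c : β)
    (h : ∀ a ∈ l, (f a).Nodup) :
    (l.flatMap f).count c = l.countP (fun a => decide (c ∈ f a)) := by
  induction l with
  | nil => rfl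
  | cons a t ih =>
    simp only [List.flatMap_cons, List.count_append, List.countP_cons]
    rw [ih (fun x hx => h x (by simp [hx]))]
    by_cases hc : c ∈ f a
    · rw [List.count_eq_one_of_mem (h a (by simp)) hc]; simp [hc]; omega
    · rw [List.count_eq_zero_of_not_mem hc]; simp [hc]

theorem pvMemFoldlAddIf {α β : Type} [BEq α] [LawfulBEq α] (l : List β) (p : β → Prop)
    [DecidablePred p] (f : β → α) : ∀ (s : PySem.Set α) (x : α),
    (x ∈ l.foldl (fun s b => if p b then PySem.Set.add s (f b) else s) s) ↔
      x ∈ s ∨ ∃ b ∈ l, p b ∧ x = f b := by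
  induction l with
  | nil => simp
  | cons a t ih =>
    intro s x
    simp only [List.foldl_cons, ih]
    by_cases h : p a
    · simp only [if_pos h, PySem.Set.mem_add]
      constructor
      · rintro (((hs | hx) ) | hb)
        · exact Or.inl hs
        · exact Or.inr ⟨a, by simp, h, hx⟩
        · rcases hb with ⟨b, hb, hpb, hx⟩; exact Or.inr ⟨b, by simp [hb], hpb, hx⟩
      · rintro (hs | ⟨b, hb, hpb, hx⟩)
        · exact Or.inl (Or.inl hs)
        · rcases List.mem_cons.mp hb with rfl | hbt
          · exact Or.inl (Or.inr hx)
          · exact Or.inr ⟨b, hbt, hpb, hx⟩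
    · simp only [if_neg h]
      constructor
      · rintro (hs | ⟨b, hb, hpb, hx⟩)
        · exact Or.inl hs
        · exact Or.inr ⟨b, by simp [hb], hpb, hx⟩
      · rintro (hs | ⟨b, hb, hpb, hx⟩)
        · exact Or.inl hs
        · rcases List.mem_cons.mp hb with rfl | hbt
          · exact absurd hpb h
          · exact Or.inr ⟨b, hbt, hpb, hx⟩

theorem pvNodupFoldlAddIf {α β : Type} [BEq α] [LawfulBEq α] (l : List β) (p : β → Prop)
    [DecidablePred p] (f : β → α) : ∀ (s : PySem.Set α), s.Nodup →
    (l.foldl (fun s b => if p b then PySem.Set.add s (f b) else s) s).Nodup := by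
  induction l with
  | nil => intro s hs; simpa
  | cons a t ih =>
    intro s hs
    simp only [List.foldl_cons]
    by_cases h : p a
    · simp only [if_pos h]; exact ih _ (PySem.Set.nodup_add s (f a) hs)
    · simp only [if_neg h]; exact ih _ hs

-- the 3×3×3×3 neighbourhood ---------------------------------------------------

def pvBox (c : PvC4) : List PvC4 :=
  [c.1 - 1, c.1, c.1 + 1].flatMap fun x =>
    [c.2.1 - 1, c.2.1, c.2.1 + 1].flatMap fun y =>
      [c.2.2.1 - 1, c.2.2.1, c.2.2.1 + 1].flatMap fun z =>
        [c.2.2.2 - 1, c.2.2.2, c.2.2.2 + 1].map fun w => (x, y, z, w)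

def pvInBox (a c : PvC4) : Prop :=
  c.1 - 1 ≤ a.1 ∧ a.1 ≤ c.1 + 1 ∧ c.2.1 - 1 ≤ a.2.1 ∧ a.2.1 ≤ c.2.1 + 1 ∧
  c.2.2.1 - 1 ≤ a.2.2.1 ∧ a.2.2.1 ≤ c.2.2.1 + 1 ∧ c.2.2.2 - 1 ≤ a.2.2.2 ∧ a.2.2.2 ≤ c.2.2.2 + 1

theorem pvMemBox (a c : PvC4) : a ∈ pvBox c ↔ pvInBox a c := by
  obtain ⟨a1, a2, a3, a4⟩ := a
  obtain ⟨c1, c2, c3, c4⟩ := c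
  simp only [pvBox, pvInBox, List.mem_flatMap, List.mem_map, List.mem_cons,
    List.not_mem_nil, or_false, Prod.mk.injEq]
  constructor
  · rintro ⟨x, hx, y, hy, z, hz, w, hw, rfl, rfl, rfl, rfl⟩
    refine ⟨by omega, by omega, by omega, by omega, by omega, by omega, by omega, by omega⟩
  · rintro ⟨h1, h2, h3, h4, h5, h6, h7, h8⟩
    exact ⟨a1, by omega, a2, by omega, a3, by omega, a4, by omega, rfl, rfl, rfl, rfl⟩

theorem pvInBox_symm (a c : PvC4) : pvInBox a c ↔ pvInBox c a := by
  obtain ⟨a1, a2, a3, a4⟩ := a; obtain ⟨c1, c2, c3, c4⟩ := c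
  simp only [pvInBox]; omega

theorem pvInBox_self (c : PvC4) : pvInBox c c := by
  obtain ⟨c1, c2, c3, c4⟩ := c; simp only [pvInBox]; omega

theorem pvNodupBox (c : PvC4) : (pvBox c).Nodup := by
  obtain ⟨c1, c2, c3, c4⟩ := c
  refine pvNodupFlatMap _ id _ (fun b => b.1) (by simp; omega) ?_ ?_
  · intro x _
    refine pvNodupFlatMap _ id _ (fun b => b.2.1) (by simp; omega) ?_ ?_
    · intro y _
      refine pvNodupFlatMap _ id _ (fun b => b.2.2.1) (by simp; omega) ?_ ?_
      · intro z _
        refine List.Nodup.map (fun u v huv => by simpa using congrArg (fun t : PvC4 => t.2.2.2) huv)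
          (by simp; omega)
      · rintro z _ b hb
        rcases List.mem_map.mp hb with ⟨w, _, rfl⟩; rfl
    · rintro y _ b hb
      rcases List.mem_flatMap.mp hb with ⟨z, _, hb⟩
      rcases List.mem_map.mp hb with ⟨w, _, rfl⟩; rfl
  · rintro x _ b hb
    rcases List.mem_flatMap.mp hb with ⟨y, _, hb⟩
    rcases List.mem_flatMap.mp hb with ⟨z, _, hb⟩
    rcases List.mem_map.mp hb with ⟨w, _, rfl⟩; rfl

def pvNbrs (c : PvC4) : List PvC4 := (pvBox c).filter (fun a => decide (a ≠ c))

theorem pvMemNbrs (a c : PvC4) : a ∈ pvNbrs c ↔ pvInBox a c ∧ a ≠ c := by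
  simp [pvNbrs, List.mem_filter, pvMemBox]

theorem pvNodupNbrs (c : PvC4) : (pvNbrs c).Nodup :=
  List.Nodup.sublist List.filter_sublist (pvNodupBox c)

theorem pvMemNbrs_symm (a c : PvC4) : a ∈ pvNbrs c ↔ c ∈ pvNbrs a := by
  simp only [pvMemNbrs, pvInBox_symm a c, ne_comm]


-- A-side: neighbour scan and next-state rule ----------------------------------

theorem pvRange3 (a : Int) : PySem.List.pyRange (a - 1) (a + 2) 1 = [a - 1, a, a + 1] := by
  rw [PySem.List.pyRange_one_cons (by omega), show a - 1 + 1 = a by omega,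
    PySem.List.pyRange_one_cons (by omega),
    PySem.List.pyRange_one_cons (by omega),
    PySem.List.pyRange_one_eq_nil (by omega)]

theorem pvIterEq (st : PvD4) (c : PvC4) :
    iterateNeighbourActivity st c = (pvNbrs c).map (fun n => getCoordinateState st n == '#') := by
  obtain ⟨c1, c2, c3, c4⟩ := c
  have h4 : ∀ x y z w : Int,
      (if ¬(x = c1 ∧ y = c2 ∧ z = c3 ∧ w = c4)
        then [getCoordinateState st (x, y, z, w) == '#'] else ([] : List Bool))
      = (if ((x, y, z, w) : PvC4) ≠ (c1, c2, c3, c4)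
        then [getCoordinateState st (x, y, z, w) == '#'] else []) :=
    fun x y z w => if_congr (by simp [Prod.mk.injEq]) rfl rfl
  rw [pvNbrs, ← pvFlatMapIf (pvBox (c1, c2, c3, c4)) (fun a => a ≠ ((c1, c2, c3, c4) : PvC4))
    (fun n => getCoordinateState st n == '#')]
  unfold iterateNeighbourActivity pvBox
  simp only [pvRange3, List.flatMap_assoc, List.flatMap_map, h4]

def pvCnt (st : PvD4) (c : PvC4) : Nat := (pvNbrs c).countP (fun n => getCoordinateState st n == '#')

theorem pvFoldEarlyNone (bl : List Bool) :
    bl.foldl (fun acc n => match acc with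
      | none => none
      | some k => let k' := k + (if n then (1 : Int) else 0); if k' > 3 then none else some k')
      none = none := by
  induction bl with
  | nil => rfl
  | cons b t ih => exact ih

theorem pvFoldEarly (bl : List Bool) : ∀ k : Int, 0 ≤ k → k ≤ 3 →
    bl.foldl (fun acc n => match acc with
      | none => none
      | some k => let k' := k + (if n then (1 : Int) else 0); if k' > 3 then none else some k')
      (some k)
    = if 3 < k + (bl.countP id : Int) then none else some (k + (bl.countP id : Int)) := by
  induction bl with
  | nil => intro k h0 h3; simp; omega
  | cons b t ih =>
    intro k h0 h3
    have hc : ((b :: t).countP id : Int) = (t.countP id : Int) + (if b then 1 else 0) := by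
      rw [List.countP_cons]; cases b <;> simp
    cases b
    · simp only [List.foldl_cons, hc, Bool.false_eq_true, if_false, add_zero]
      rw [if_neg (by omega), ih k h0 h3]
    · simp only [List.foldl_cons, hc, if_true]
      by_cases hk : k + 1 > 3
      · rw [if_pos hk, pvFoldEarlyNone,
          if_pos (by have := Int.natCast_nonneg (t.countP id); omega)]
      · rw [if_neg hk, ih (k + 1) (by omega) (by omega),
          show k + 1 + (t.countP id : Int) = k + ((t.countP id : Int) + 1) by ring]

theorem pvFindNext (st : PvD4) (c : PvC4) :
    findNextState st c = if getCoordinateState st c = '#'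
      then (if pvCnt st c = 2 ∨ pvCnt st c = 3 then '#' else '.')
      else (if pvCnt st c = 3 then '#' else '.') := by
  unfold findNextState
  rw [pvIterEq, pvFoldEarly _ 0 le_rfl (by omega)]
  have hcnt : (((pvNbrs c).map (fun n => getCoordinateState st n == '#')).countP id : Int)
      = (pvCnt st c : Int) := by
    rw [List.countP_map]; rfl
  rw [hcnt, zero_add]
  by_cases ha : getCoordinateState st c = '#'
  · rw [if_pos ha]
    have hb : (getCoordinateState st c == '#') = true := by simp [ha]
    by_cases hbig : 3 < (pvCnt st c : Int)
    · rw [if_pos hbig, if_neg (by omega)]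
    · rw [if_neg hbig]
      simp only [hb, if_true]
      by_cases h2 : pvCnt st c = 2 ∨ pvCnt st c = 3
      · rw [if_pos h2, if_neg (by omega)]
      · rw [if_neg h2, if_pos (by omega)]
  · rw [if_neg ha]
    have hb : (getCoordinateState st c == '#') = false := by simp [ha]
    by_cases hbig : 3 < (pvCnt st c : Int)
    · rw [if_pos hbig, if_neg (by omega)]
    · rw [if_neg hbig]
      simp only [hb, Bool.false_eq_true, if_false]
      by_cases h3 : pvCnt st c = 3
      · rw [if_pos h3, if_neg (by omega)]
      · rw [if_neg h3, if_pos (by omega)]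

-- A-side: point update of the nested state ------------------------------------

def pvUpd (ns : PvD4) (c : PvC4) (v : Char) : PvD4 :=
  ns.modify c.1 PySem.Dict.empty (fun a =>
    a.modify c.2.1 PySem.Dict.empty (fun b =>
      b.modify c.2.2.1 PySem.Dict.empty (fun cz => cz.insert c.2.2.2 v)))

theorem pvGetCoordUpd (ns : PvD4) (c c' : PvC4) (v : Char) :
    getCoordinateState (pvUpd ns c v) c' = if c' = c then v else getCoordinateState ns c' := by
  obtain ⟨x, y, z, w⟩ := c; obtain ⟨x', y', z', w'⟩ := c'
  simp only [pvUpd, getCoordinateState, Prod.mk.injEq]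
  by_cases h1 : x' = x <;> by_cases h2 : y' = y <;> by_cases h3 : z' = z <;> by_cases h4 : w' = w <;>
    simp [PySem.Dict.getD_modify, PySem.Dict.getD_insert, h1, h2, h3, h4]

theorem pvGetCoordEmpty (c : PvC4) : getCoordinateState PySem.Dict.empty c = '.' := by
  simp [getCoordinateState, PySem.Dict.getD_empty]

theorem pvGetCoordFold (L : List PvC4) (f : PvC4 → Char) (c' : PvC4) : ∀ ns,
    getCoordinateState (L.foldl (fun ns c => pvUpd ns c (f c)) ns) c'
      = if c' ∈ L then f c' else getCoordinateState ns c' := by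
  induction L with
  | nil => intro ns; simp
  | cons a t ih =>
    intro ns
    simp only [List.foldl_cons, ih, pvGetCoordUpd, List.mem_cons]
    by_cases h1 : c' ∈ t <;> by_cases h2 : c' = a <;> simp [h1, h2]

-- nested-nodup invariants ------------------------------------------------------

def pvDN {ν : Type} (P : ν → Prop) (d : PySem.Dict Int ν) : Prop :=
  d.keys.Nodup ∧ ∀ p ∈ d.items, P p.2

theorem pvGetDCases {κ ν : Type} [BEq κ] [LawfulBEq κ] (d : PySem.Dict κ ν) (k : κ) (d0 : ν) :
    d.getD k d0 = d0 ∨ (k, d.getD k d0) ∈ d.items := by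
  rcases h : d.get? k with _ | v
  · left; simp [PySem.Dict.getD_eq_get?_getD, h]
  · right
    have hm := PySem.Dict.mem_items_of_get?_eq_some d h
    simpa [PySem.Dict.getD_eq_get?_getD, h] using hm

theorem pvDN_empty {ν : Type} (P : ν → Prop) : pvDN P PySem.Dict.empty :=
  ⟨by simp [PySem.Dict.keys_empty], by intro p hp; simp [PySem.Dict.empty] at hp⟩

theorem pvDN_insert {ν : Type} (P : ν → Prop) (d : PySem.Dict Int ν) (k : Int) (v : ν)
    (h : pvDN P d) (hv : P v) : pvDN P (d.insert k v) := by
  refine ⟨PySem.Dict.nodup_keys_insert d k v h.1, ?_⟩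
  intro p hp
  rcases (PySem.Dict.mem_items_insert d k v p).mp hp with rfl | ⟨hp, _⟩
  · exact hv
  · exact h.2 p hp

theorem pvDN_modify {ν : Type} (P : ν → Prop) (d : PySem.Dict Int ν) (k : Int) (d0 : ν) (f : ν → ν)
    (h : pvDN P d) (hd0 : P d0) (hf : ∀ v, P v → P (f v)) : pvDN P (d.modify k d0 f) := by
  simp only [PySem.Dict.modify]
  refine pvDN_insert P d k _ h (hf _ ?_)
  rcases pvGetDCases d k d0 with he | hm
  · rw [he]; exact hd0
  · exact h.2 _ hm

def pvNK1 (d : PvD1) : Prop := d.keys.Nodup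
def pvNK2 (d : PvD2) : Prop := pvDN pvNK1 d
def pvNK3 (d : PvD3) : Prop := pvDN pvNK2 d
def pvNK4 (d : PvD4) : Prop := pvDN pvNK3 d

theorem pvNK4_upd (ns : PvD4) (c : PvC4) (v : Char) (h : pvNK4 ns) : pvNK4 (pvUpd ns c v) := by
  unfold pvUpd pvNK4
  refine pvDN_modify _ _ _ _ _ h (pvDN_empty _) (fun a ha => ?_)
  refine pvDN_modify _ _ _ _ _ ha (pvDN_empty _) (fun b hb => ?_)
  refine pvDN_modify _ _ _ _ _ hb (by simp [pvNK1, PySem.Dict.keys_empty]) (fun cz hcz => ?_)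
  exact PySem.Dict.nodup_keys_insert _ _ _ hcz

theorem pvFoldPreserve {σ α : Type} (Q : σ → Prop) (f : σ → α → σ)
    (h : ∀ s a, Q s → Q (f s a)) : ∀ (l : List α) (s : σ), Q s → Q (l.foldl f s) := by
  intro l
  induction l with
  | nil => intro s hs; exact hs
  | cons a t ih => intro s hs; exact ih _ (h s a hs)


-- A-side: the list of active ('#') coordinates of a nested state ---------------

def pvH1 (d : PvD1) : List Int := (d.items.filter (fun t => t.2 == '#')).map (fun t => t.1)
def pvH2 (d : PvD2) : List (Int × Int) :=
  d.items.flatMap (fun r => (pvH1 r.2).map (fun w => (r.1, w)))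
def pvH3 (d : PvD3) : List (Int × Int × Int) :=
  d.items.flatMap (fun q => (pvH2 q.2).map (fun t => (q.1, t.1, t.2)))
def pvH4 (st : PvD4) : List PvC4 :=
  st.items.flatMap (fun p => (pvH3 p.2).map (fun t => (p.1, t.1, t.2.1, t.2.2)))

theorem pvFoldH4 {σ : Type} (g : σ → PvC4 → σ) (st : PvD4) (init : σ) :
    (pvH4 st).foldl g init =
      st.items.foldl (fun col p =>
        p.2.items.foldl (fun col q =>
          q.2.items.foldl (fun col r =>
            r.2.items.foldl (fun col t =>
              if t.2 == '#' then g col (p.1, q.1, r.1, t.1) else col) col) col) col) init := by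
  simp only [pvH4, pvH3, pvH2, pvH1, List.foldl_flatMap, List.foldl_map,
    ← PySem.List.foldl_if_eq_foldl_filter]

theorem pvH1_mem (d : PvD1) (h : pvNK1 d) (w : Int) :
    w ∈ pvH1 d ↔ d.getD w '.' = '#' := by
  constructor
  · intro hw
    rcases List.mem_map.mp hw with ⟨t, ht, rfl⟩
    rcases List.mem_filter.mp ht with ⟨hmem, hch⟩
    obtain ⟨tk, tv⟩ := t
    have : tv = '#' := by simpa using hch
    subst this
    rw [PySem.Dict.getD_eq_get?_getD, PySem.Dict.get?_of_mem_items d hmem h]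
    rfl
  · intro hw
    rcases hg : d.get? w with _ | v
    · rw [PySem.Dict.getD_eq_get?_getD, hg] at hw; simp at hw
    · rw [PySem.Dict.getD_eq_get?_getD, hg] at hw
      simp only [Option.getD_some] at hw
      subst hw
      have hm := PySem.Dict.mem_items_of_get?_eq_some d hg
      exact List.mem_map.mpr ⟨(w, '#'), List.mem_filter.mpr ⟨hm, by simp⟩, rfl⟩

theorem pvH2_mem (d : PvD2) (h : pvNK2 d) (p : Int × Int) :
    p ∈ pvH2 d ↔ (d.getD p.1 PySem.Dict.empty).getD p.2 '.' = '#' := by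
  constructor
  · intro hp
    rcases List.mem_flatMap.mp hp with ⟨r, hr, hp⟩
    rcases List.mem_map.mp hp with ⟨w, hw, rfl⟩
    obtain ⟨rk, rv⟩ := r
    have hv : d.getD rk PySem.Dict.empty = rv := PySem.Dict.getD_of_mem_items d hr h.1 PySem.Dict.empty
    simp only [hv]
    exact (pvH1_mem rv (h.2 (rk, rv) hr) w).mp hw
  · intro hp
    rcases pvGetDCases d p.1 PySem.Dict.empty with he | hm
    · rw [he, PySem.Dict.getD_empty] at hp; simp at hp
    · refine List.mem_flatMap.mpr ⟨(p.1, d.getD p.1 PySem.Dict.empty), hm, ?_⟩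
      refine List.mem_map.mpr ⟨p.2, ?_, rfl⟩
      exact (pvH1_mem _ (h.2 _ hm) p.2).mpr hp

theorem pvH3_mem (d : PvD3) (h : pvNK3 d) (p : Int × Int × Int) :
    p ∈ pvH3 d ↔ ((d.getD p.1 PySem.Dict.empty).getD p.2.1 PySem.Dict.empty).getD p.2.2 '.' = '#' := by
  constructor
  · intro hp
    rcases List.mem_flatMap.mp hp with ⟨q, hq, hp⟩
    rcases List.mem_map.mp hp with ⟨t, ht, rfl⟩
    obtain ⟨qk, qv⟩ := q
    have hv : d.getD qk PySem.Dict.empty = qv := PySem.Dict.getD_of_mem_items d hq h.1 PySem.Dict.empty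
    simp only [hv]
    exact (pvH2_mem qv (h.2 (qk, qv) hq) t).mp ht
  · intro hp
    rcases pvGetDCases d p.1 PySem.Dict.empty with he | hm
    · rw [he] at hp; simp [PySem.Dict.getD_empty] at hp
    · refine List.mem_flatMap.mpr ⟨(p.1, d.getD p.1 PySem.Dict.empty), hm, ?_⟩
      refine List.mem_map.mpr ⟨(p.2.1, p.2.2), (pvH2_mem _ (h.2 _ hm) _).mpr hp, rfl⟩

theorem pvH4_mem (st : PvD4) (h : pvNK4 st) (c : PvC4) :
    c ∈ pvH4 st ↔ getCoordinateState st c = '#' := by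
  constructor
  · intro hc
    rcases List.mem_flatMap.mp hc with ⟨p, hp, hc⟩
    rcases List.mem_map.mp hc with ⟨t, ht, rfl⟩
    obtain ⟨pk, pv⟩ := p
    have hv : st.getD pk PySem.Dict.empty = pv := PySem.Dict.getD_of_mem_items st hp h.1 PySem.Dict.empty
    simp only [getCoordinateState, hv]
    exact (pvH3_mem pv (h.2 (pk, pv) hp) t).mp ht
  · intro hc
    rcases pvGetDCases st c.1 PySem.Dict.empty with he | hm
    · simp only [getCoordinateState, he, PySem.Dict.getD_empty] at hc; simp at hc
    · refine List.mem_flatMap.mpr ⟨(c.1, st.getD c.1 PySem.Dict.empty), hm, ?_⟩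
      refine List.mem_map.mpr ⟨(c.2.1, c.2.2.1, c.2.2.2), ?_, rfl⟩
      exact (pvH3_mem _ (h.2 _ hm) _).mpr hc

theorem pvH1_nodup (d : PvD1) (h : pvNK1 d) : (pvH1 d).Nodup := by
  have : (d.items.filter (fun t => t.2 == '#')).map (fun t => t.1) |>.Sublist (d.items.map (fun t => t.1)) :=
    List.Sublist.map _ List.filter_sublist
  exact List.Nodup.sublist this h

theorem pvH2_nodup (d : PvD2) (h : pvNK2 d) : (pvH2 d).Nodup := by
  refine pvNodupFlatMap d.items (fun r => r.1) _ (fun b => b.1) h.1 ?_ ?_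
  · intro r hr
    exact List.Nodup.map (fun u v huv => by simpa using congrArg Prod.snd huv)
      (pvH1_nodup r.2 (h.2 r hr))
  · rintro r hr b hb
    rcases List.mem_map.mp hb with ⟨w, _, rfl⟩; rfl

theorem pvH3_nodup (d : PvD3) (h : pvNK3 d) : (pvH3 d).Nodup := by
  refine pvNodupFlatMap d.items (fun q => q.1) _ (fun b => b.1) h.1 ?_ ?_
  · intro q hq
    exact List.Nodup.map (fun u v huv => by simpa using congrArg Prod.snd huv)
      (pvH2_nodup q.2 (h.2 q hq))
  · rintro q hq b hb
    rcases List.mem_map.mp hb with ⟨t, _, rfl⟩; rfl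

theorem pvH4_nodup (st : PvD4) (h : pvNK4 st) : (pvH4 st).Nodup := by
  refine pvNodupFlatMap st.items (fun p => p.1) _ (fun b => b.1) h.1 ?_ ?_
  · intro p hp
    refine List.Nodup.map (fun u v huv => ?_) (pvH3_nodup p.2 (h.2 p hp))
    obtain ⟨u1, u2, u3⟩ := u; obtain ⟨v1, v2, v3⟩ := v
    simpa [Prod.ext_iff] using huv
  · rintro p hp b hb
    rcases List.mem_map.mp hb with ⟨t, _, rfl⟩; rfl

-- A-side: the counting pass ----------------------------------------------------

theorem pvCountFold1 (l : List (Int × Char)) (a : Int) :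
    l.foldl (fun acc t => if t.2 == '#' then acc + 1 else acc) a
      = a + ((l.filter (fun t => t.2 == '#')).length : Int) := by
  rw [PySem.List.foldl_if_add_one, List.countP_eq_length_filter]

theorem pvCountFold2 (l : List (Int × PvD1)) : ∀ a : Int,
    l.foldl (fun acc r => r.2.items.foldl (fun acc t => if t.2 == '#' then acc + 1 else acc) acc) a
      = a + ((l.flatMap (fun r => (pvH1 r.2).map (fun w => (r.1, w)))).length : Int) := by
  induction l with
  | nil => intro a; simp
  | cons r t ih =>
    intro a
    simp only [List.foldl_cons, List.flatMap_cons, List.length_append]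
    rw [pvCountFold1, ih]
    have : ((pvH1 r.2).map (fun w => (r.1, w))).length = (r.2.items.filter (fun t => t.2 == '#')).length := by
      simp [pvH1]
    push_cast
    omega

theorem pvCountFold3 (l : List (Int × PvD2)) : ∀ a : Int,
    l.foldl (fun acc q => q.2.items.foldl
      (fun acc r => r.2.items.foldl (fun acc t => if t.2 == '#' then acc + 1 else acc) acc) acc) a
      = a + ((l.flatMap (fun q => (pvH2 q.2).map (fun t => (q.1, t.1, t.2)))).length : Int) := by
  induction l with
  | nil => intro a; simp
  | cons q t ih =>
    intro a
    simp only [List.foldl_cons, List.flatMap_cons, List.length_append]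
    rw [pvCountFold2, ih]
    simp only [List.length_map, pvH2]
    push_cast
    omega

theorem pvCountFold4 (l : List (Int × PvD3)) : ∀ a : Int,
    l.foldl (fun acc p => p.2.items.foldl (fun acc q => q.2.items.foldl
      (fun acc r => r.2.items.foldl (fun acc t => if t.2 == '#' then acc + 1 else acc) acc) acc) acc) a
      = a + ((l.flatMap (fun p => (pvH3 p.2).map (fun t => (p.1, t.1, t.2.1, t.2.2)))).length : Int) := by
  induction l with
  | nil => intro a; simp
  | cons p t ih =>
    intro a
    simp only [List.foldl_cons, List.flatMap_cons, List.length_append]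
    rw [pvCountFold3, ih]
    simp only [List.length_map, pvH3, pvH2]
    push_cast
    omega

-- A-side: one cycle, flattened -------------------------------------------------
-- A-side: the coordinates-of-interest structure --------------------------------

def pvUpdI (col : PvI3) (c : PvC4) : PvI3 :=
  col.modify c.1 PySem.Dict.empty (fun dy =>
    dy.modify c.2.1 PySem.Dict.empty (fun dz =>
      dz.modify c.2.2.1 PySem.Set.empty (fun s => PySem.Set.add s c.2.2.2)))

def pvCL2 (d : PvI1) : List (Int × Int) := d.items.flatMap (fun r => r.2.map (fun w => (r.1, w)))
def pvCL3 (d : PvI2) : List (Int × Int × Int) :=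
  d.items.flatMap (fun q => (pvCL2 q.2).map (fun t => (q.1, t.1, t.2)))
def pvCL4 (d : PvI3) : List PvC4 :=
  d.items.flatMap (fun p => (pvCL3 p.2).map (fun t => (p.1, t.1, t.2.1, t.2.2)))

def pvSK1 (d : PvI1) : Prop := d.keys.Nodup
def pvSK2 (d : PvI2) : Prop := pvDN pvSK1 d
def pvSK3 (d : PvI3) : Prop := pvDN pvSK2 d

theorem pvSK3_updI (col : PvI3) (c : PvC4) (h : pvSK3 col) : pvSK3 (pvUpdI col c) := by
  unfold pvUpdI pvSK3
  refine pvDN_modify _ _ _ _ _ h (pvDN_empty _) (fun a ha => ?_)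
  refine pvDN_modify _ _ _ _ _ ha (by simp [pvSK1, PySem.Dict.keys_empty]) (fun b hb => ?_)
  simp only [PySem.Dict.modify]
  exact PySem.Dict.nodup_keys_insert _ _ _ hb

theorem pvCL2_modify (d : PvI1) (z w : Int) (h : pvSK1 d) (p : Int × Int) :
    p ∈ pvCL2 (d.modify z PySem.Set.empty (fun s => PySem.Set.add s w)) ↔
      p ∈ pvCL2 d ∨ p = (z, w) := by
  simp only [PySem.Dict.modify, pvCL2, List.mem_flatMap]
  constructor
  · rintro ⟨r, hr, hp⟩
    rcases (PySem.Dict.mem_items_insert d z _ r).mp hr with rfl | ⟨hr, _⟩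
    · rcases List.mem_map.mp hp with ⟨w', hw', rfl⟩
      rcases (PySem.Set.mem_add _ _ _).mp hw' with hw' | rfl
      · rcases pvGetDCases d z PySem.Set.empty with he | hm
        · rw [he] at hw'; cases hw'
        · exact Or.inl ⟨(z, d.getD z PySem.Set.empty), hm, List.mem_map_of_mem hw'⟩
      · exact Or.inr rfl
    · exact Or.inl ⟨r, hr, hp⟩
  · rintro (⟨r, hr, hp⟩ | rfl)
    · obtain ⟨rk, rv⟩ := r
      by_cases hz : rk = z
      · subst hz
        have hv : d.getD rk PySem.Set.empty = rv := PySem.Dict.getD_of_mem_items d hr h PySem.Set.empty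
        refine ⟨(rk, PySem.Set.add (d.getD rk PySem.Set.empty) w),
          (PySem.Dict.mem_items_insert d rk _ _).mpr (Or.inl rfl), ?_⟩
        rcases List.mem_map.mp hp with ⟨w', hw', rfl⟩
        exact List.mem_map_of_mem ((PySem.Set.mem_add _ _ _).mpr (Or.inl (by rwa [hv])))
      · exact ⟨(rk, rv), (PySem.Dict.mem_items_insert d z _ _).mpr (Or.inr ⟨hr, hz⟩), hp⟩
    · refine ⟨(z, PySem.Set.add (d.getD z PySem.Set.empty) w),
        (PySem.Dict.mem_items_insert d z _ _).mpr (Or.inl rfl), ?_⟩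
      exact List.mem_map_of_mem ((PySem.Set.mem_add _ _ _).mpr (Or.inr rfl))

theorem pvCL3_modify (d : PvI2) (y z w : Int) (h : pvSK2 d) (p : Int × Int × Int) :
    p ∈ pvCL3 (d.modify y PySem.Dict.empty
        (fun dz => dz.modify z PySem.Set.empty (fun s => PySem.Set.add s w))) ↔
      p ∈ pvCL3 d ∨ p = (y, z, w) := by
  simp only [PySem.Dict.modify, pvCL3, List.mem_flatMap]
  constructor
  · rintro ⟨q, hq, hp⟩
    rcases (PySem.Dict.mem_items_insert d y _ q).mp hq with rfl | ⟨hq, _⟩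
    · rcases List.mem_map.mp hp with ⟨t, ht, rfl⟩
      have hsk : pvSK1 (d.getD y PySem.Dict.empty) := by
        rcases pvGetDCases d y PySem.Dict.empty with he | hm
        · rw [he]; simp [pvSK1, PySem.Dict.keys_empty]
        · exact h.2 _ hm
      rcases (pvCL2_modify _ z w hsk t).mp ht with ht | rfl
      · rcases pvGetDCases d y PySem.Dict.empty with he | hm
        · rw [he] at ht; simp [pvCL2, PySem.Dict.empty] at ht
        · exact Or.inl ⟨(y, d.getD y PySem.Dict.empty), hm, List.mem_map_of_mem ht⟩
      · exact Or.inr rfl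
    · exact Or.inl ⟨q, hq, hp⟩
  · rintro (⟨q, hq, hp⟩ | rfl)
    · obtain ⟨qk, qv⟩ := q
      by_cases hy : qk = y
      · subst hy
        have hv : d.getD qk PySem.Dict.empty = qv := PySem.Dict.getD_of_mem_items d hq h.1 PySem.Dict.empty
        refine ⟨(qk, (d.getD qk PySem.Dict.empty).modify z PySem.Set.empty
            (fun s => PySem.Set.add s w)),
          (PySem.Dict.mem_items_insert d qk _ _).mpr (Or.inl rfl), ?_⟩
        rcases List.mem_map.mp hp with ⟨t, ht, rfl⟩
        have hsk : pvSK1 (d.getD qk PySem.Dict.empty) := by rw [hv]; exact h.2 (qk, qv) hq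
        exact List.mem_map_of_mem ((pvCL2_modify _ z w hsk t).mpr (Or.inl (by rwa [hv])))
      · exact ⟨(qk, qv), (PySem.Dict.mem_items_insert d y _ _).mpr (Or.inr ⟨hq, hy⟩), hp⟩
    · have hsk : pvSK1 (d.getD y PySem.Dict.empty) := by
        rcases pvGetDCases d y PySem.Dict.empty with he | hm
        · rw [he]; simp [pvSK1, PySem.Dict.keys_empty]
        · exact h.2 _ hm
      refine ⟨(y, (d.getD y PySem.Dict.empty).modify z PySem.Set.empty
          (fun s => PySem.Set.add s w)),
        (PySem.Dict.mem_items_insert d y _ _).mpr (Or.inl rfl), ?_⟩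
      exact List.mem_map_of_mem ((pvCL2_modify _ z w hsk (z, w)).mpr (Or.inr rfl))

theorem pvCL4_updI (col : PvI3) (c : PvC4) (h : pvSK3 col) (c' : PvC4) :
    c' ∈ pvCL4 (pvUpdI col c) ↔ c' ∈ pvCL4 col ∨ c' = c := by
  obtain ⟨x, y, z, w⟩ := c
  simp only [pvUpdI, PySem.Dict.modify, pvCL4, List.mem_flatMap]
  constructor
  · rintro ⟨p, hp, hc⟩
    rcases (PySem.Dict.mem_items_insert col x _ p).mp hp with rfl | ⟨hp, _⟩
    · rcases List.mem_map.mp hc with ⟨t, ht, rfl⟩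
      have hsk : pvSK2 (col.getD x PySem.Dict.empty) := by
        rcases pvGetDCases col x PySem.Dict.empty with he | hm
        · rw [he]; exact pvDN_empty _
        · exact h.2 _ hm
      rcases (pvCL3_modify _ y z w hsk t).mp ht with ht' | rfl
      · rcases pvGetDCases col x PySem.Dict.empty with he | hm
        · rw [he] at ht'; simp [pvCL3, PySem.Dict.empty] at ht'
        · exact Or.inl ⟨(x, col.getD x PySem.Dict.empty), hm, List.mem_map_of_mem ht'⟩
      · exact Or.inr rfl
    · exact Or.inl ⟨p, hp, hc⟩
  · rintro (⟨p, hp, hc⟩ | rfl)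
    · obtain ⟨pk, pv⟩ := p
      by_cases hx : pk = x
      · subst hx
        have hv : col.getD pk PySem.Dict.empty = pv := PySem.Dict.getD_of_mem_items col hp h.1 PySem.Dict.empty
        refine ⟨(pk, (col.getD pk PySem.Dict.empty).modify y PySem.Dict.empty
            (fun dz => dz.modify z PySem.Set.empty (fun s => PySem.Set.add s w))),
          (PySem.Dict.mem_items_insert col pk _ _).mpr (Or.inl rfl), ?_⟩
        rcases List.mem_map.mp hc with ⟨t, ht, rfl⟩
        have hsk : pvSK2 (col.getD pk PySem.Dict.empty) := by rw [hv]; exact h.2 (pk, pv) hp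
        exact List.mem_map_of_mem ((pvCL3_modify _ y z w hsk t).mpr (Or.inl (by rwa [hv])))
      · exact ⟨(pk, pv), (PySem.Dict.mem_items_insert col x _ _).mpr (Or.inr ⟨hp, hx⟩), hc⟩
    · have hsk : pvSK2 (col.getD x PySem.Dict.empty) := by
        rcases pvGetDCases col x PySem.Dict.empty with he | hm
        · rw [he]; exact pvDN_empty _
        · exact h.2 _ hm
      refine ⟨(x, (col.getD x PySem.Dict.empty).modify y PySem.Dict.empty
          (fun dz => dz.modify z PySem.Set.empty (fun s => PySem.Set.add s w))),
        (PySem.Dict.mem_items_insert col x _ _).mpr (Or.inl rfl), ?_⟩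
      exact List.mem_map_of_mem ((pvCL3_modify _ y z w hsk (y, z, w)).mpr (Or.inr rfl))

theorem pvFoldBox {σ : Type} (g : σ → PvC4 → σ) (c : PvC4) (init : σ) :
    (pvBox c).foldl g init =
      [c.1 - 1, c.1, c.1 + 1].foldl (fun s x =>
        [c.2.1 - 1, c.2.1, c.2.1 + 1].foldl (fun s y =>
          [c.2.2.1 - 1, c.2.2.1, c.2.2.1 + 1].foldl (fun s z =>
            [c.2.2.2 - 1, c.2.2.2, c.2.2.2 + 1].foldl (fun s w => g s (x, y, z, w)) s) s) s) init := by
  simp only [pvBox, List.foldl_flatMap, List.foldl_map]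

theorem pvAddSurrEq (col : PvI3) (mid : PvC4) :
    addSurroundingCoordinates col mid = (pvBox mid).foldl pvUpdI col := by
  obtain ⟨x, y, z, w⟩ := mid
  unfold addSurroundingCoordinates
  rw [pvFoldBox]
  simp only [pvRange3]
  rfl

theorem pvCL4_foldUpdI (L : List PvC4) : ∀ col, pvSK3 col →
    pvSK3 (L.foldl pvUpdI col) ∧
      ∀ c', (c' ∈ pvCL4 (L.foldl pvUpdI col) ↔ c' ∈ pvCL4 col ∨ c' ∈ L) := by
  induction L with
  | nil => intro col h; exact ⟨h, fun c' => by simp⟩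
  | cons a t ih =>
    intro col h
    obtain ⟨h1, h2⟩ := ih (pvUpdI col a) (pvSK3_updI col a h)
    refine ⟨h1, fun c' => ?_⟩
    rw [List.foldl_cons, h2 c', pvCL4_updI col a h c']
    simp only [List.mem_cons]
    tauto

def pvInterest (st : PvD4) : PvI3 :=
  (pvH4 st).foldl (fun col a => addSurroundingCoordinates col a) PySem.Dict.empty

theorem pvFoldCL4 {σ : Type} (g : σ → PvC4 → σ) (d : PvI3) (init : σ) :
    (pvCL4 d).foldl g init =
      d.items.foldl (fun ns p =>
        p.2.items.foldl (fun ns q =>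
          q.2.items.foldl (fun ns r =>
            r.2.foldl (fun ns w => g ns (p.1, q.1, r.1, w)) ns) ns) ns) init := by
  simp only [pvCL4, pvCL3, pvCL2, List.foldl_flatMap, List.foldl_map]

theorem pvRunCycleEq (st : PvD4) :
    runCycle st = (pvCL4 (pvInterest st)).foldl
      (fun ns c => pvUpd ns c (findNextState st c)) PySem.Dict.empty := by
  simp only [runCycle, pvInterest]
  rw [← pvFoldH4 (g := fun col a => addSurroundingCoordinates col a),
    pvFoldCL4 (g := fun ns c => pvUpd ns c (findNextState st c))]
  rfl

theorem pvNK4_runCycle (st : PvD4) : pvNK4 (runCycle st) := by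
  rw [pvRunCycleEq]
  exact pvFoldPreserve pvNK4 _ (fun s a hs => pvNK4_upd _ _ _ hs) _ _ (pvDN_empty _)

theorem pvRunCycleGet (st : PvD4) (c : PvC4) :
    getCoordinateState (runCycle st) c
      = if c ∈ pvCL4 (pvInterest st) then findNextState st c else '.' := by
  rw [pvRunCycleEq, pvGetCoordFold]
  by_cases h : c ∈ pvCL4 (pvInterest st) <;> simp [h, pvGetCoordEmpty]

theorem pvInterestSup (st : PvD4) (a : PvC4) (ha : a ∈ pvH4 st) (c : PvC4)
    (hc : c ∈ pvBox a) : c ∈ pvCL4 (pvInterest st) := by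
  unfold pvInterest
  have main : ∀ (L : List PvC4) (col : PvI3), pvSK3 col →
      pvSK3 (L.foldl (fun col a => addSurroundingCoordinates col a) col) ∧
      ∀ c', (c' ∈ pvCL4 (L.foldl (fun col a => addSurroundingCoordinates col a) col) ↔
        c' ∈ pvCL4 col ∨ ∃ b ∈ L, c' ∈ pvBox b) := by
    intro L
    induction L with
    | nil => intro col h; exact ⟨h, fun c' => by simp⟩
    | cons b t ih =>
      intro col h
      have hstep : pvSK3 (addSurroundingCoordinates col b) ∧
          ∀ c', (c' ∈ pvCL4 (addSurroundingCoordinates col b) ↔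
            c' ∈ pvCL4 col ∨ c' ∈ pvBox b) := by
        rw [pvAddSurrEq]
        obtain ⟨h1, h2⟩ := pvCL4_foldUpdI (pvBox b) col h
        exact ⟨h1, h2⟩
      obtain ⟨h1, h2⟩ := ih (addSurroundingCoordinates col b) hstep.1
      refine ⟨h1, fun c' => ?_⟩
      rw [List.foldl_cons, h2 c', hstep.2 c']
      simp only [List.mem_cons]
      constructor
      · rintro ((hc | hb) | ⟨x, hx, hbx⟩)
        · exact Or.inl hc
        · exact Or.inr ⟨b, Or.inl rfl, hb⟩
        · exact Or.inr ⟨x, Or.inr hx, hbx⟩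
      · rintro (hc | ⟨x, (rfl | hx), hbx⟩)
        · exact Or.inl (Or.inl hc)
        · exact Or.inl (Or.inr hbx)
        · exact Or.inr ⟨x, hx, hbx⟩
  have hsk : pvSK3 (PySem.Dict.empty : PvI3) := pvDN_empty _
  exact ((main (pvH4 st) PySem.Dict.empty hsk).2 c).mpr (Or.inr ⟨a, ha, hc⟩)

-- B-side: the scatter pass ------------------------------------------------------

def pvNbrsB (c : PvC4) : List PvC4 :=
  ([-1, 0, 1] : List Int).flatMap fun dx =>
    ([-1, 0, 1] : List Int).flatMap fun dy =>
      ([-1, 0, 1] : List Int).flatMap fun dz =>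
        ([-1, 0, 1] : List Int).flatMap fun dw =>
          if dx ≠ 0 ∨ dy ≠ 0 ∨ dz ≠ 0 ∨ dw ≠ 0 then
            [(c.1 + dx, c.2.1 + dy, c.2.2.1 + dz, c.2.2.2 + dw)] else []

theorem pvMemNbrsB (a c : PvC4) : a ∈ pvNbrsB c ↔ pvInBox a c ∧ a ≠ c := by
  obtain ⟨a1, a2, a3, a4⟩ := a; obtain ⟨c1, c2, c3, c4⟩ := c
  simp only [pvNbrsB, List.mem_flatMap, pvMemSingletonIf, List.mem_cons, List.not_mem_nil,
    or_false, pvInBox, Prod.mk.injEq, ne_eq]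
  constructor
  · rintro ⟨dx, hdx, dy, hdy, dz, hdz, dw, hdw, hcond, h1, h2, h3, h4⟩
    refine ⟨⟨by omega, by omega, by omega, by omega, by omega, by omega, by omega, by omega⟩, ?_⟩
    intro heq
    obtain ⟨e1, e2, e3, e4⟩ := heq
    omega
  · rintro ⟨⟨b1, b2, b3, b4, b5, b6, b7, b8⟩, hne⟩
    have hne' : ¬(a1 = c1 ∧ a2 = c2 ∧ a3 = c3 ∧ a4 = c4) := by
      intro ⟨e1, e2, e3, e4⟩; exact hne (by simp [e1, e2, e3, e4])
    exact ⟨a1 - c1, by omega, a2 - c2, by omega, a3 - c3, by omega, a4 - c4, by omega,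
      by omega, by omega, by omega, by omega, by omega⟩

theorem pvNodupNbrsB (c : PvC4) : (pvNbrsB c).Nodup := by
  refine pvNodupFlatMap _ id _ (fun b => b.1 - c.1) (by decide) ?_ ?_
  · intro dx _
    refine pvNodupFlatMap _ id _ (fun b => b.2.1 - c.2.1) (by decide) ?_ ?_
    · intro dy _
      refine pvNodupFlatMap _ id _ (fun b => b.2.2.1 - c.2.2.1) (by decide) ?_ ?_
      · intro dz _
        refine pvNodupFlatMap _ id _ (fun b => b.2.2.2 - c.2.2.2) (by decide) ?_ ?_
        · intro dw _; split <;> simp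
        · rintro dw _ b hb
          rcases (pvMemSingletonIf _ _ b).mp hb with ⟨_, rfl⟩
          simp
      · rintro dz _ b hb
        rcases List.mem_flatMap.mp hb with ⟨dw, _, hb⟩
        rcases (pvMemSingletonIf _ _ b).mp hb with ⟨_, rfl⟩
        simp
    · rintro dy _ b hb
      rcases List.mem_flatMap.mp hb with ⟨dz, _, hb⟩
      rcases List.mem_flatMap.mp hb with ⟨dw, _, hb⟩
      rcases (pvMemSingletonIf _ _ b).mp hb with ⟨_, rfl⟩
      simp
  · rintro dx _ b hb
    rcases List.mem_flatMap.mp hb with ⟨dy, _, hb⟩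
    rcases List.mem_flatMap.mp hb with ⟨dz, _, hb⟩
    rcases List.mem_flatMap.mp hb with ⟨dw, _, hb⟩
    rcases (pvMemSingletonIf _ _ b).mp hb with ⟨_, rfl⟩
    simp

def pvScatter (active : List PvC4) : PySem.Dict PvC4 Int :=
  (active.flatMap pvNbrsB).foldl (fun d n => d.modify n 0 (· + 1)) PySem.Dict.empty

theorem pvCountsEq (active : PySem.Set PvC4) :
    active.foldl (fun d c =>
      ([-1, 0, 1] : List Int).foldl (fun d dx =>
        ([-1, 0, 1] : List Int).foldl (fun d dy =>
          ([-1, 0, 1] : List Int).foldl (fun d dz =>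
            ([-1, 0, 1] : List Int).foldl (fun d dw =>
              if dx ≠ 0 ∨ dy ≠ 0 ∨ dz ≠ 0 ∨ dw ≠ 0 then
                d.modify (c.1 + dx, c.2.1 + dy, c.2.2.1 + dz, c.2.2.2 + dw) 0 (· + 1)
              else d) d) d) d) d) PySem.Dict.empty
    = pvScatter active := by
  unfold pvScatter
  rw [List.foldl_flatMap]
  apply PySem.List.foldl_congr_mem
  intro d c _
  simp only [pvNbrsB, List.foldl_flatMap, pvFoldlSingletonIf]

def pvN (s : List PvC4) (c : PvC4) : Nat := s.countP (fun a => decide (c ∈ pvNbrs a))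

theorem pvScatter_getD (active : List PvC4) (c : PvC4) :
    (pvScatter active).getD c 0 = (pvN active c : Int) := by
  unfold pvScatter
  rw [PySem.Dict.getD_foldl_modify_add_one, PySem.Dict.getD_empty, zero_add,
    pvCountFlatMapNodup _ _ _ (fun a _ => pvNodupNbrsB a)]
  unfold pvN
  congr 1
  refine List.countP_congr (fun a _ => ?_)
  simp only [decide_eq_true_eq, pvMemNbrsB, pvMemNbrs]

theorem pvScatter_keys_nodup (active : List PvC4) : (pvScatter active).keys.Nodup := by
  unfold pvScatter
  exact PySem.Dict.nodup_keys_foldl_modify_key _ (fun x => x) 0 (fun _ _ => (· + 1)) _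
    (by rw [PySem.Dict.keys_empty]; exact List.nodup_nil)

theorem pvScatter_mem_keys (active : List PvC4) (c : PvC4) :
    c ∈ (pvScatter active).keys ↔ c ∈ active.flatMap pvNbrsB := by
  unfold pvScatter
  rw [PySem.Dict.keys_foldl_modify, PySem.Dict.keys_empty, PySem.Set.update_nil_left]
  exact PySem.Set.mem_ofList _ _

theorem pvStepAltMem (s : PySem.Set PvC4) (c : PvC4) :
    c ∈ stepAlt s ↔ (pvN s c = 3 ∨ (pvN s c = 2 ∧ c ∈ s)) := by
  simp only [stepAlt]
  rw [pvCountsEq, pvMemFoldlAddIf]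
  simp only [show (PySem.Set.empty : PySem.Set PvC4) = [] from rfl, List.not_mem_nil, false_or]
  constructor
  · rintro ⟨⟨k, n⟩, hmem, hcond, rfl⟩
    have hget : (pvScatter s).get? c = some n :=
      (PySem.Dict.get?_eq_some_iff_mem_items _ _ _ (pvScatter_keys_nodup s)).mpr hmem
    have hn : (pvN s c : Int) = n := by
      rw [← pvScatter_getD, PySem.Dict.getD_eq_get?_getD, hget]; rfl
    rcases hcond with hc3 | ⟨hc2, hcs⟩
    · left
      have : n = 3 := by simpa using hc3
      omega
    · right
      have : n = 2 := by simpa using hc2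
      exact ⟨by omega, (PySem.Set.contains_iff s c).mp hcs⟩
  · intro h
    have hpos : 0 < pvN s c := by rcases h with h | ⟨h, _⟩ <;> omega
    obtain ⟨a, ha, hdec⟩ := List.countP_pos_iff.mp hpos
    have hcB : c ∈ pvNbrsB a := (pvMemNbrsB c a).mpr ((pvMemNbrs c a).mp (of_decide_eq_true hdec))
    have hkeys := (pvScatter_mem_keys s c).mpr (List.mem_flatMap.mpr ⟨a, ha, hcB⟩)
    rcases hg : (pvScatter s).get? c with _ | v
    · exact absurd hkeys ((PySem.Dict.get?_eq_none_iff_not_mem_keys _ _).mp hg)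
    · have hv : (pvN s c : Int) = v := by
        rw [← pvScatter_getD, PySem.Dict.getD_eq_get?_getD, hg]; rfl
      refine ⟨(c, v), PySem.Dict.mem_items_of_get?_eq_some _ hg, ?_, rfl⟩
      rcases h with h3 | ⟨h2, hcs⟩
      · left; simp only [beq_iff_eq]; omega
      · right
        exact ⟨by simp only [beq_iff_eq]; omega, (PySem.Set.contains_iff s c).mpr hcs⟩

theorem pvStepAltNodup (s : PySem.Set PvC4) : (stepAlt s).Nodup := by
  simp only [stepAlt]
  exact pvNodupFoldlAddIf _ _ _ _ List.nodup_nil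

theorem pvCntEq (st : PvD4) (s : List PvC4) (hs : s.Nodup)
    (hinv : ∀ c, getCoordinateState st c = '#' ↔ c ∈ s) (c : PvC4) :
    pvCnt st c = pvN s c := by
  unfold pvCnt pvN
  have h1 : (pvNbrs c).countP (fun n => getCoordinateState st n == '#')
      = (pvNbrs c).countP (fun n => decide (n ∈ s)) :=
    List.countP_congr (fun n _ => by simp [hinv n])
  rw [h1, List.countP_eq_length_filter, List.countP_eq_length_filter]
  have hperm : ((pvNbrs c).filter (fun n => decide (n ∈ s))).Perm
      (s.filter (fun a => decide (c ∈ pvNbrs a))) := by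
    rw [List.perm_ext_iff_of_nodup (List.Nodup.filter _ (pvNodupNbrs c)) (List.Nodup.filter _ hs)]
    intro a
    simp only [List.mem_filter, decide_eq_true_eq]
    constructor
    · rintro ⟨hin, hmem⟩
      exact ⟨hmem, (pvMemNbrs_symm a c).mp hin⟩
    · rintro ⟨hmem, hin⟩
      exact ⟨(pvMemNbrs_symm a c).mpr hin, hmem⟩
  rw [hperm.length_eq]

theorem pvStep (st : PvD4) (s : PySem.Set PvC4) (h1 : pvNK4 st) (h2 : s.Nodup)
    (h3 : ∀ c, getCoordinateState st c = '#' ↔ c ∈ s) :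
    pvNK4 (runCycle st) ∧ (stepAlt s).Nodup ∧
      ∀ c, (getCoordinateState (runCycle st) c = '#' ↔ c ∈ stepAlt s) := by
  refine ⟨pvNK4_runCycle st, pvStepAltNodup s, fun c => ?_⟩
  rw [pvRunCycleGet, pvStepAltMem]
  have hcnt : pvCnt st c = pvN s c := pvCntEq st s h2 h3 c
  by_cases hmem : c ∈ pvCL4 (pvInterest st)
  · rw [if_pos hmem, pvFindNext]
    by_cases ha : getCoordinateState st c = '#'
    · rw [if_pos ha]
      have hcs : c ∈ s := (h3 c).mp ha
      constructor
      · intro hchar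
        by_cases hc23 : pvCnt st c = 2 ∨ pvCnt st c = 3
        · rcases hc23 with hcc | hcc
          · exact Or.inr ⟨by omega, hcs⟩
          · exact Or.inl (by omega)
        · rw [if_neg hc23] at hchar; exact absurd hchar (by decide)
      · intro hB
        have hc23 : pvCnt st c = 2 ∨ pvCnt st c = 3 := by
          rcases hB with hB | ⟨hB, _⟩ <;> omega
        rw [if_pos hc23]
    · rw [if_neg ha]
      have hcs : c ∉ s := fun hc => ha ((h3 c).mpr hc)
      constructor
      · intro hchar
        by_cases hc3 : pvCnt st c = 3
        · exact Or.inl (by omega)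
        · rw [if_neg hc3] at hchar; exact absurd hchar (by decide)
      · intro hB
        have hc3 : pvCnt st c = 3 := by
          rcases hB with hB | ⟨_, habs⟩
          · omega
          · exact absurd habs hcs
        rw [if_pos hc3]
  · rw [if_neg hmem]
    constructor
    · intro h; exact absurd h (by decide)
    · intro hB
      exfalso
      apply hmem
      rcases hB with hB3 | ⟨hB2, hcs⟩
      · have hpos : 0 < pvN s c := by omega
        obtain ⟨a, ha, hdec⟩ := List.countP_pos_iff.mp hpos
        have haH : a ∈ pvH4 st := (pvH4_mem st h1 a).mpr ((h3 a).mpr ha)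
        have hcB : c ∈ pvBox a := by
          have hin := of_decide_eq_true hdec
          rw [pvMemNbrs] at hin
          exact (pvMemBox c a).mpr hin.1
        exact pvInterestSup st a haH c hcB
      · have ha : getCoordinateState st c = '#' := (h3 c).mpr hcs
        exact pvInterestSup st c ((pvH4_mem st h1 c).mpr ha) c ((pvMemBox c c).mpr (pvInBox_self c))

-- parsing ----------------------------------------------------------------------

theorem pvEnumFoldPair {α ν : Type} (l : List α) (g : α → ν) : ∀ (d : PySem.Dict Int ν) (i : Int),
    l.foldl (fun (acc : PySem.Dict Int ν × Int) a => (acc.1.insert acc.2 (g a), acc.2 + 1)) (d, i)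
      = ((PySem.List.enumerate l i).foldl (fun d p => d.insert p.1 (g p.2)) d, i + l.length) := by
  induction l with
  | nil => intro d i; simp [PySem.List.enumerate]
  | cons a t ih =>
    intro d i
    simp only [List.foldl_cons, PySem.List.enumerate_cons, ih]
    rw [Prod.ext_iff]
    refine ⟨rfl, ?_⟩
    simp only [List.length_cons]
    push_cast
    ring

theorem pvEnumFoldGet {α ν : Type} (l : List α) (g : α → ν) : ∀ (i : Int) (d : PySem.Dict Int ν) (k : Int),
    ((PySem.List.enumerate l i).foldl (fun d p => d.insert p.1 (g p.2)) d).get? k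
      = if i ≤ k ∧ k < i + l.length then (l[(k - i).toNat]?).map g else d.get? k := by
  induction l with
  | nil =>
    intro i d k
    rw [if_neg (by simp only [List.length_nil, Nat.cast_zero, add_zero]; omega)]
    rfl
  | cons a t ih =>
    intro i d k
    rw [PySem.List.enumerate_cons]
    simp only [List.foldl_cons]
    rw [ih (i + 1)]
    by_cases h1 : i + 1 ≤ k ∧ k < i + 1 + t.length
    · rw [if_pos h1, if_pos (by simp only [List.length_cons]; push_cast; omega)]
      rw [show (k - i).toNat = (k - (i + 1)).toNat + 1 by omega, List.getElem?_cons_succ]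
    · rw [if_neg h1, PySem.Dict.get?_insert]
      by_cases h2 : k = i
      · subst h2
        rw [if_pos rfl, if_pos (by simp only [List.length_cons]; push_cast; omega)]
        simp
      · rw [if_neg h2, if_neg (by simp only [List.length_cons] at *; push_cast at *; omega)]

theorem pvFoldInsertValues {β ν : Type} (l : List β) (key : β → Int) (val : β → ν)
    (P : ν → Prop) (hv : ∀ b, P (val b)) :
    ∀ d : PySem.Dict Int ν, (∀ p ∈ d.items, P p.2) →
    ∀ p ∈ (l.foldl (fun d b => d.insert (key b) (val b)) d).items, P p.2 := by
  induction l with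
  | nil => intro d hd; exact hd
  | cons b t ih =>
    intro d hd
    refine ih _ (fun p hp => ?_)
    rcases (PySem.Dict.mem_items_insert d (key b) (val b) p).mp hp with rfl | ⟨hp, _⟩
    · exact hv b
    · exact hd p hp

def pvRowG (xLine : String) : PvD3 :=
  (xLine.toList.foldl
    (fun (acc2 : PvD3 × Int) cube =>
      (acc2.1.insert acc2.2 (PySem.Dict.mk [((0 : Int), PySem.Dict.mk [((0 : Int), cube)])]),
       acc2.2 + 1))
    (PySem.Dict.empty, (0 : Int))).1

def pvParse (input : String) : PvD4 :=
  ((PySem.Str.splitlines input).foldl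
    (fun (acc : PvD4 × Int) xLine => (acc.1.insert acc.2 (pvRowG xLine), acc.2 + 1))
    (PySem.Dict.empty, (0 : Int))).1

theorem pvRowGet (line : String) (y : Int) :
    (pvRowG line).get? y = if 0 ≤ y ∧ y < line.toList.length
      then (line.toList[y.toNat]?).map
        (fun cube => PySem.Dict.mk [((0 : Int), PySem.Dict.mk [((0 : Int), cube)])])
      else none := by
  unfold pvRowG
  rw [pvEnumFoldPair]
  simp only
  rw [pvEnumFoldGet line.toList
    (fun cube => PySem.Dict.mk [((0 : Int), PySem.Dict.mk [((0 : Int), cube)])]) 0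
    PySem.Dict.empty y]
  by_cases h : 0 ≤ y ∧ y < 0 + line.toList.length
  · rw [if_pos h, if_pos (by omega), show y - 0 = y by ring]
  · rw [if_neg h, if_neg (by omega), PySem.Dict.get?_empty]

theorem pvParseGet (input : String) (x : Int) :
    (pvParse input).get? x = if 0 ≤ x ∧ x < (PySem.Str.splitlines input).length
      then ((PySem.Str.splitlines input)[x.toNat]?).map pvRowG
      else none := by
  unfold pvParse
  rw [pvEnumFoldPair]
  simp only
  rw [pvEnumFoldGet (PySem.Str.splitlines input) pvRowG 0 PySem.Dict.empty x]
  by_cases h : 0 ≤ x ∧ x < 0 + (PySem.Str.splitlines input).length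
  · rw [if_pos h, if_pos (by omega), show x - 0 = x by ring]
  · rw [if_neg h, if_neg (by omega), PySem.Dict.get?_empty]

theorem pvRowNK (line : String) : pvNK3 (pvRowG line) := by
  unfold pvRowG
  rw [pvEnumFoldPair]
  simp only
  constructor
  · refine PySem.Dict.nodup_keys_foldl_insert_key _ _ _ _ ?_
    rw [PySem.Dict.keys_empty]; exact List.nodup_nil
  · refine pvFoldInsertValues _ _ _ pvNK2 ?_ _ (pvDN_empty pvNK2).2
    intro b
    refine ⟨by simp, ?_⟩
    intro p hp
    rcases List.mem_singleton.mp hp with rfl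
    exact (by simp [pvNK1] : pvNK1 (PySem.Dict.mk [((0 : Int), b.2)]))

theorem pvParseNK (input : String) : pvNK4 (pvParse input) := by
  unfold pvParse
  rw [pvEnumFoldPair]
  simp only
  constructor
  · refine PySem.Dict.nodup_keys_foldl_insert_key
      (PySem.List.enumerate (PySem.Str.splitlines input) 0)
      (fun p : Int × String => p.1) (fun _ p => pvRowG p.2) PySem.Dict.empty ?_
    rw [PySem.Dict.keys_empty]; exact List.nodup_nil
  · exact pvFoldInsertValues (PySem.List.enumerate (PySem.Str.splitlines input) 0)
      (fun p : Int × String => p.1) (fun p => pvRowG p.2) pvNK3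
      (fun b => pvRowNK b.2) PySem.Dict.empty (pvDN_empty pvNK3).2

theorem pvParseAct (input : String) (c : PvC4) :
    getCoordinateState (pvParse input) c = '#' ↔
      ∃ (k : Nat) (hk : k < (PySem.Str.splitlines input).length)
        (j : Nat) (hj : j < ((PySem.Str.splitlines input)[k]).toList.length),
        c = ((k : Int), (j : Int), 0, 0) ∧ ((PySem.Str.splitlines input)[k]).toList[j] = '#' := by
  obtain ⟨x, y, z, w⟩ := c
  constructor
  · intro h
    simp only [getCoordinateState] at h
    by_cases hx : 0 ≤ x ∧ x < ((PySem.Str.splitlines input).length : Int)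
    · have h1 : (pvParse input).getD x PySem.Dict.empty
          = (((PySem.Str.splitlines input)[x.toNat]?).map pvRowG).getD PySem.Dict.empty := by
        rw [PySem.Dict.getD_eq_get?_getD, pvParseGet, if_pos hx]
      rcases hg : (PySem.Str.splitlines input)[x.toNat]? with _ | line
      · rw [h1, hg] at h
        simp [PySem.Dict.getD_empty] at h
      · rw [h1, hg] at h
        simp only [Option.map_some, Option.getD_some] at h
        by_cases hy : 0 ≤ y ∧ y < (line.toList.length : Int)
        · have h2 : (pvRowG line).getD y PySem.Dict.empty
              = ((line.toList[y.toNat]?).map (fun cube => PySem.Dict.mk [((0 : Int),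
                  PySem.Dict.mk [((0 : Int), cube)])])).getD PySem.Dict.empty := by
            rw [PySem.Dict.getD_eq_get?_getD, pvRowGet, if_pos hy]
          rcases hgl : line.toList[y.toNat]? with _ | ch
          · rw [h2, hgl] at h
            simp [PySem.Dict.getD_empty] at h
          · rw [h2, hgl] at h
            simp only [Option.map_some, Option.getD_some] at h
            by_cases hz : z = 0
            · subst hz
              rw [show (PySem.Dict.mk [((0 : Int), PySem.Dict.mk [((0 : Int), ch)])]).getD 0
                  PySem.Dict.empty = PySem.Dict.mk [((0 : Int), ch)] from rfl] at h
              by_cases hw : w = 0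
              · subst hw
                rw [show (PySem.Dict.mk [((0 : Int), ch)]).getD 0 '.' = ch from rfl] at h
                subst h
                obtain ⟨hk', hline⟩ := List.getElem?_eq_some_iff.mp hg
                obtain ⟨hj', hchar⟩ := List.getElem?_eq_some_iff.mp hgl
                refine ⟨x.toNat, hk', y.toNat, by rw [hline]; exact hj', ?_, ?_⟩
                · simp only [Prod.mk.injEq]
                  exact ⟨by omega, by omega, trivial⟩
                · simp only [hline]
                  exact hchar
              · exfalso
                rw [PySem.Dict.getD_eq_get?_getD, PySem.Dict.get?_mk_cons,
                  if_neg (by simp only [beq_iff_eq]; omega)] at h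
                rw [show (PySem.Dict.mk ([] : List (Int × Char))).get? w = none from rfl] at h
                exact absurd h (by decide)
            · exfalso
              have h3 : (PySem.Dict.mk [((0 : Int), PySem.Dict.mk [((0 : Int), ch)])]).getD z
                  PySem.Dict.empty = PySem.Dict.empty := by
                rw [PySem.Dict.getD_eq_get?_getD, PySem.Dict.get?_mk_cons,
                  if_neg (by simp only [beq_iff_eq]; omega)]
                rfl
              rw [h3, PySem.Dict.getD_empty] at h
              exact absurd h (by decide)
        · have h2 : (pvRowG line).getD y PySem.Dict.empty = PySem.Dict.empty := by
            rw [PySem.Dict.getD_eq_get?_getD, pvRowGet, if_neg (by omega)]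
            rfl
          rw [h2, PySem.Dict.getD_empty, PySem.Dict.getD_empty] at h
          exact absurd h (by decide)
    · have h1 : (pvParse input).getD x PySem.Dict.empty = PySem.Dict.empty := by
        rw [PySem.Dict.getD_eq_get?_getD, pvParseGet, if_neg (by omega)]
        rfl
      rw [h1, PySem.Dict.getD_empty, PySem.Dict.getD_empty, PySem.Dict.getD_empty] at h
      exact absurd h (by decide)
  · rintro ⟨k, hk, j, hj, heq, hch⟩
    obtain ⟨rfl, rfl, rfl, rfl⟩ : x = (k : Int) ∧ y = (j : Int) ∧ z = 0 ∧ w = 0 := by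
      simpa [Prod.ext_iff] using heq
    simp only [getCoordinateState]
    have h1 : (pvParse input).getD (k : Int) PySem.Dict.empty
        = pvRowG ((PySem.Str.splitlines input)[k]) := by
      rw [PySem.Dict.getD_eq_get?_getD, pvParseGet, if_pos (by constructor <;> omega),
        show ((k : Int)).toNat = k from Int.toNat_natCast k, List.getElem?_eq_getElem hk]
      rfl
    rw [h1]
    have h2 : (pvRowG ((PySem.Str.splitlines input)[k])).getD (j : Int) PySem.Dict.empty
        = PySem.Dict.mk [((0 : Int), PySem.Dict.mk [((0 : Int),
            ((PySem.Str.splitlines input)[k]).toList[j])])] := by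
      rw [PySem.Dict.getD_eq_get?_getD, pvRowGet, if_pos (by constructor <;> omega),
        show ((j : Int)).toNat = j from Int.toNat_natCast j, List.getElem?_eq_getElem hj]
      rfl
    rw [h2]
    rw [show (PySem.Dict.mk [((0 : Int), PySem.Dict.mk [((0 : Int),
          ((PySem.Str.splitlines input)[k]).toList[j])])]).getD 0 PySem.Dict.empty
        = PySem.Dict.mk [((0 : Int), ((PySem.Str.splitlines input)[k]).toList[j])] from rfl,
      show (PySem.Dict.mk [((0 : Int), ((PySem.Str.splitlines input)[k]).toList[j])]).getD 0 '.'
        = ((PySem.Str.splitlines input)[k]).toList[j] from rfl]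
    exact hch


-- B-side: the initial active set ------------------------------------------------

def pvActive0 (input : String) : PySem.Set PvC4 :=
  (PySem.List.enumerate (PySem.Str.splitlines input) 0).foldl (fun s p =>
    (PySem.List.enumerate p.2.toList 0).foldl
      (fun s q => if q.2 == '#' then PySem.Set.add s (p.1, q.1, (0 : Int), (0 : Int)) else s) s)
    PySem.Set.empty

theorem pvActive0Nodup (input : String) : (pvActive0 input).Nodup := by
  unfold pvActive0
  have main : ∀ (L : List (Int × String)) (s : PySem.Set PvC4), s.Nodup →
      (L.foldl (fun s p => (PySem.List.enumerate p.2.toList 0).foldl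
        (fun s q => if q.2 == '#' then PySem.Set.add s (p.1, q.1, (0 : Int), (0 : Int)) else s) s)
        s).Nodup := by
    intro L
    induction L with
    | nil => intro s hs; exact hs
    | cons a t ih => intro s hs; exact ih _ (pvNodupFoldlAddIf _ _ _ _ hs)
  exact main _ _ List.nodup_nil

theorem pvActive0Mem (input : String) (c : PvC4) :
    c ∈ pvActive0 input ↔
      ∃ (k : Nat) (hk : k < (PySem.Str.splitlines input).length)
        (j : Nat) (hj : j < ((PySem.Str.splitlines input)[k]).toList.length),
        c = ((k : Int), (j : Int), 0, 0) ∧ ((PySem.Str.splitlines input)[k]).toList[j] = '#' := by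
  unfold pvActive0
  have outer : ∀ (L : List (Int × String)) (s : PySem.Set PvC4) (c : PvC4),
      (c ∈ L.foldl (fun s p => (PySem.List.enumerate p.2.toList 0).foldl
        (fun s q => if q.2 == '#' then PySem.Set.add s (p.1, q.1, (0 : Int), (0 : Int)) else s) s)
        s) ↔
      c ∈ s ∨ ∃ p ∈ L, ∃ q ∈ PySem.List.enumerate p.2.toList 0,
        q.2 = '#' ∧ c = (p.1, q.1, (0 : Int), (0 : Int)) := by
    intro L
    induction L with
    | nil => intro s c; simp
    | cons a t ih =>
      intro s c
      rw [List.foldl_cons, ih,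
        pvMemFoldlAddIf (PySem.List.enumerate a.2.toList 0) (fun q => (q.2 == '#') = true)
          (fun q => (a.1, q.1, (0 : Int), (0 : Int))) s c]
      constructor
      · rintro ((hs | ⟨q, hq, hcond, rfl⟩) | ⟨p, hp, q, hq, hcond, rfl⟩)
        · exact Or.inl hs
        · exact Or.inr ⟨a, by simp, q, hq, by simpa using hcond, rfl⟩
        · exact Or.inr ⟨p, by simp [hp], q, hq, hcond, rfl⟩
      · rintro (hs | ⟨p, hp, q, hq, hcond, rfl⟩)
        · exact Or.inl (Or.inl hs)
        · rcases List.mem_cons.mp hp with rfl | hp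
          · exact Or.inl (Or.inr ⟨q, hq, by simpa using hcond, rfl⟩)
          · exact Or.inr ⟨p, hp, q, hq, hcond, rfl⟩
  rw [outer]
  simp only [show (PySem.Set.empty : PySem.Set PvC4) = [] from rfl, List.not_mem_nil, false_or]
  constructor
  · rintro ⟨p, hp, q, hq, hch, rfl⟩
    rcases (PySem.List.mem_enumerate_iff _ _ p).mp hp with ⟨k, hk, rfl⟩
    rcases (PySem.List.mem_enumerate_iff _ _ q).mp hq with ⟨j, hj, rfl⟩
    exact ⟨k, hk, j, hj, by simp, hch⟩
  · rintro ⟨k, hk, j, hj, rfl, hch⟩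
    refine ⟨(0 + (k : Int), (PySem.Str.splitlines input)[k]),
      (PySem.List.mem_enumerate_iff _ _ _).mpr ⟨k, hk, rfl⟩,
      (0 + (j : Int), ((PySem.Str.splitlines input)[k]).toList[j]),
      (PySem.List.mem_enumerate_iff _ _ _).mpr ⟨j, hj, rfl⟩, hch, by simp⟩

-- the six cycles and the final count -------------------------------------------

theorem pvIter (L : List Nat) : ∀ (st : PvD4) (s : PySem.Set PvC4),
    pvNK4 st → s.Nodup → (∀ c, (getCoordinateState st c = '#' ↔ c ∈ s)) →
    pvNK4 (L.foldl (fun s _ => runCycle s) st) ∧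
      (L.foldl (fun s _ => stepAlt s) s).Nodup ∧
      ∀ c, (getCoordinateState (L.foldl (fun s _ => runCycle s) st) c = '#' ↔
        c ∈ L.foldl (fun s _ => stepAlt s) s) := by
  induction L with
  | nil => intro st s h1 h2 h3; exact ⟨h1, h2, h3⟩
  | cons n t ih =>
    intro st s h1 h2 h3
    obtain ⟨g1, g2, g3⟩ := pvStep st s h1 h2 h3
    exact ih (runCycle st) (stepAlt s) g1 g2 g3

theorem pvCountFinal (st : PvD4) (s : PySem.Set PvC4) (h1 : pvNK4 st) (h2 : s.Nodup)
    (h3 : ∀ c, (getCoordinateState st c = '#' ↔ c ∈ s)) :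
    st.items.foldl (fun acc p =>
      p.2.items.foldl (fun acc q =>
        q.2.items.foldl (fun acc r =>
          r.2.items.foldl (fun acc t =>
            if t.2 == '#' then acc + 1 else acc) acc) acc) acc) (0 : Int)
      = (s.length : Int) := by
  rw [pvCountFold4 st.items 0]
  have hperm : (pvH4 st).Perm s :=
    (List.perm_ext_iff_of_nodup (pvH4_nodup st h1) h2).mpr
      (fun c => (pvH4_mem st h1 c).trans (h3 c))
  rw [show st.items.flatMap (fun p => (pvH3 p.2).map (fun t => (p.1, t.1, t.2.1, t.2.2)))
      = pvH4 st from rfl, hperm.length_eq, zero_add]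

theorem pvSolveEq (input : String) :
    solve input = ((List.range 6).foldl (fun s _ => runCycle s) (pvParse input)).items.foldl
      (fun acc p =>
        p.2.items.foldl (fun acc q =>
          q.2.items.foldl (fun acc r =>
            r.2.items.foldl (fun acc t =>
              if t.2 == '#' then acc + 1 else acc) acc) acc) acc) (0 : Int) := rfl

theorem pvSolveAltEq (input : String) :
    solve_alt input = (((List.range 6).foldl (fun s _ => stepAlt s) (pvActive0 input)).length : Int) := rfl
-- ===== VERDICT (by name: the statement is the Claim_ definition above) =====
theorem solve_spec : Claim_equal_solve := by
  intro input _
  unfold Spec_solve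
  rw [pvSolveEq, pvSolveAltEq]
  obtain ⟨h1, h2, h3⟩ := pvIter (List.range 6) (pvParse input) (pvActive0 input)
    (pvParseNK input) (pvActive0Nodup input)
    (fun c => (pvParseAct input c).trans (pvActive0Mem input c).symm)
  exact pvCountFinal _ _ h1 h2 h3
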